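-- pv_equiv track=rewrite | github.com/XingyanLiu/stagewiseNN | funx_amph.py | rank_of_stages
-- ===== SOURCE A (Python) =====
-- def rank_of_stages(stages):
--     '''
--     stages: a ordered list
--     return:
--         ranks: a list of integers that encode the rank od stages, with the same
--         length of `stages`
--     '''
--     ranks = [0]
--     for i, stg in enumerate(stages):
--         if i == 0: continue
--         if stg == stages[i - 1]:
--             ranks += [ranks[i - 1]]
--         else:
--             ranks += [ranks[i - 1] + 1]
--
--     ### Better make a mapping instead !!!
--     return ranks
-- ===== SOURCE B (Python) =====
-- def rank_of_stages(stages):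
--     # Run-length encode the stages into (stage, count) runs, then expand
--     # run number r into count copies of r.  Returns [] for an empty input
--     # (A returns [0] there; see claim).
--     runs = []
--     for stg in stages:
--         if runs and runs[-1][0] == stg:
--             runs[-1] = (runs[-1][0], runs[-1][1] + 1)
--         else:
--             runs.append((stg, 1))
--     ranks = []
--     for r, (_, n) in enumerate(runs):
--         ranks += [r] * n
--     return ranks
-- ===== Notes on version B (the rewrite author's own statement) =====
-- stated objective: alternative
-- what changed: Replaces A's element-by-element loop that compares stages[i-1] and reads ranks[i-1] back out of the output list with a two-phase run-based algorithm: run-length encode the stages into (stage,count) runs, then expand run r into count copies of r.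
-- intended difference: On the empty list A returns [0] (a length-1 rank list for 0 stages, an artefact of seeding ranks=[0]); B returns [], the intended rank list with the same length as the input. — e.g. on rank_of_stages([]): A returns [0], B returns []
import Mathlib
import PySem

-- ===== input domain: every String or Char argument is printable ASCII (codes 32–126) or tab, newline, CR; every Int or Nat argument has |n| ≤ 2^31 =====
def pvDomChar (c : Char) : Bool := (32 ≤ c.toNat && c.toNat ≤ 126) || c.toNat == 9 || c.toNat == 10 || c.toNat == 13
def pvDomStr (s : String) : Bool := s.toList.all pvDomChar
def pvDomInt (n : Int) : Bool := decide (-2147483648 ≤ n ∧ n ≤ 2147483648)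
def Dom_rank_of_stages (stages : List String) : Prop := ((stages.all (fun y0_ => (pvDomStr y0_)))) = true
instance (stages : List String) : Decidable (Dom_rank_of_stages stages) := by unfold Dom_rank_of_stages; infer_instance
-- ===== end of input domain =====

-- B replaces A's element-by-element compare-with-previous loop (which reads ranks[i-1]
-- back out of the output) with run-length encoding followed by expanding run r to
-- count copies of r; B returns [] on the empty input where A returns [0] (see D_).


-- ===== PORT A =====
-- one loop iteration of A: skip i == 0, else append ranks[i-1] (+1 if the stage changed)
def stepA (stages : List String) (ranks : List Int) (p : Int × String) : List Int :=
  if p.1 == 0 then ranks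
  else if p.2 == PySem.List.pyGetD stages (p.1 - 1) ""
       then ranks ++ [PySem.List.pyGetD ranks (p.1 - 1) 0]
       else ranks ++ [PySem.List.pyGetD ranks (p.1 - 1) 0 + 1]

def rank_of_stages (stages : List String) : List Int :=
  (PySem.List.enumerate stages).foldl (stepA stages) [0]

-- ===== PORT B =====
-- first loop of B: extend the last run or start a new one
def stepR (runs : List (String × Nat)) (stg : String) : List (String × Nat) :=
  match runs.getLast? with
  | some last => if last.1 == stg then runs.dropLast ++ [(last.1, last.2 + 1)]
                 else runs ++ [(stg, 1)]
  | none => runs ++ [(stg, 1)]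

-- second loop of B: ranks += [r] * n
def stepE (ranks : List Int) (p : Int × (String × Nat)) : List Int :=
  ranks ++ List.replicate p.2.2 p.1

def rank_of_stages_alt (stages : List String) : List Int :=
  let runs := stages.foldl stepR []
  (PySem.List.enumerate runs).foldl stepE []

-- ===== PRECONDITION & SPEC =====
-- On the empty list A returns [0] (a length-1 rank list for 0 stages, an artefact of
-- seeding ranks=[0]); B returns [], the intended rank list with the input's length.
def D_rank_of_stages (stages : List String) : Prop := stages = []
instance (stages : List String) : Decidable (D_rank_of_stages stages) := by unfold D_rank_of_stages; infer_instance

def Spec_rank_of_stages (stages : List String) (out : List Int) : Prop := ¬ D_rank_of_stages stages → out = rank_of_stages_alt stages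
instance (stages : List String) (out : List Int) : Decidable (Spec_rank_of_stages stages out) := by unfold Spec_rank_of_stages; infer_instance

def pvDiffWitness_rank_of_stages : List String := []
def pvDiffWitnessOut_rank_of_stages : (List Int) × (List Int) := ([0], [])

-- ===== CLAIM (what is proved, stated in full; the proofs are below) =====
def Claim_unchanged_rank_of_stages : Prop := ∀ (stages : List String), Dom_rank_of_stages stages → Spec_rank_of_stages stages (rank_of_stages stages)
def Claim_changed_rank_of_stages : Prop := Dom_rank_of_stages (pvDiffWitness_rank_of_stages) ∧ D_rank_of_stages (pvDiffWitness_rank_of_stages) ∧ rank_of_stages (pvDiffWitness_rank_of_stages) = pvDiffWitnessOut_rank_of_stages.1 ∧ rank_of_stages_alt (pvDiffWitness_rank_of_stages) = pvDiffWitnessOut_rank_of_stages.2 ∧ pvDiffWitnessOut_rank_of_stages.1 ≠ pvDiffWitnessOut_rank_of_stages.2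
def Claim_exact_rank_of_stages : Prop := ∀ (stages : List String), Dom_rank_of_stages stages → D_rank_of_stages stages → rank_of_stages stages ≠ rank_of_stages_alt stages

-- ===== LEMMAS AND PROOFS =====
-- reference: ranks of the suffix l, given the previous stage prev with rank r
def refRun (prev : String) (l : List String) (r : Int) : List Int :=
  match l with
  | [] => []
  | x :: xs => if x == prev then r :: refRun x xs r else (r + 1) :: refRun x xs (r + 1)

-- reference run-length encoding of l after an open run (k, n)
def rleSpec (k : String) (n : Nat) (l : List String) : List (String × Nat) :=
  match l with
  | [] => [(k, n)]
  | x :: xs => if k == x then rleSpec k (n + 1) xs else (k, n) :: rleSpec x 1 xs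

-- reference expansion: run number i gets its count many copies of i
def expSpec (i : Nat) (runs : List (String × Nat)) : List Int :=
  match runs with
  | [] => []
  | (_, n) :: rest => List.replicate n (i : Int) ++ expSpec (i + 1) rest

theorem lemA (l stages : List String) : ∀ (i : Nat) (ranks : List Int) (prev : String) (r : Int),
    stages.drop i = prev :: l → ranks.length = i + 1 → ranks.getLast? = some r →
    List.foldl (stepA stages) ranks (PySem.List.enumerate l ((i : Int) + 1)) = ranks ++ refRun prev l r := by
  induction l with
  | nil => intro i ranks prev r _ _ _; simp [refRun]
  | cons x xs ih =>
    intro i ranks prev r hdrop hlen hlast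
    have hget : stages[i]? = some prev := by
      have h0 : (List.drop i stages)[0]? = stages[i + 0]? := List.getElem?_drop
      rw [hdrop] at h0; simpa using h0.symm
    have hranks : ranks[i]? = some r := by
      rw [← hlast, List.getLast?_eq_getElem?, hlen]; simp
    have hstep : stepA stages ranks ((i : Int) + 1, x) =
        ranks ++ [if x == prev then r else r + 1] := by
      unfold stepA
      have h1 : ¬ (((i : Int) + 1 == 0) = true) := by simp only [beq_iff_eq]; omega
      have h2 : (i : Int) + 1 - 1 = (i : Int) := by ring
      rw [if_neg h1, h2]
      have hg : PySem.List.pyGetD stages (i : Int) "" = prev := by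
        rw [PySem.List.pyGetD_natCast]; simp [List.getD, hget]
      have hr : PySem.List.pyGetD ranks (i : Int) 0 = r := by
        rw [PySem.List.pyGetD_natCast]; simp [List.getD, hranks]
      rw [hg, hr]
      by_cases h : x = prev <;> simp [h]
    rw [PySem.List.enumerate_cons, List.foldl_cons, hstep]
    have hdrop' : stages.drop (i + 1) = x :: xs := by
      have : stages.drop (i + 1) = (stages.drop i).drop 1 := by
        rw [List.drop_drop]
      rw [this, hdrop]; simp
    have hcast : (i : Int) + 1 + 1 = ((i + 1 : Nat) : Int) + 1 := by push_cast; ring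
    rw [hcast, ih (i + 1) (ranks ++ [if x == prev then r else r + 1]) x
      (if x == prev then r else r + 1) hdrop' (by simp [hlen]) (by simp)]
    by_cases h : x = prev <;> simp [refRun, h]

theorem lemR (l : List String) : ∀ (runs : List (String × Nat)) (k : String) (n : Nat),
    List.foldl stepR (runs ++ [(k, n)]) l = runs ++ rleSpec k n l := by
  induction l with
  | nil => intro runs k n; simp [rleSpec]
  | cons x xs ih =>
    intro runs k n
    rw [List.foldl_cons]
    have hstep : stepR (runs ++ [(k, n)]) x =
        if k == x then runs ++ [(k, n + 1)] else (runs ++ [(k, n)]) ++ [(x, 1)] := by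
      unfold stepR
      rw [List.getLast?_concat]
      by_cases h : k = x <;> simp [h]
    rw [hstep]
    by_cases h : k = x
    · subst h
      rw [if_pos (by simp)]
      rw [ih runs k (n + 1)]
      simp [rleSpec]
    · have hb : (k == x) = false := by simp [h]
      rw [if_neg (by simp [h])]
      rw [ih (runs ++ [(k, n)]) x 1]
      simp [rleSpec, hb]

theorem lemE (runs : List (String × Nat)) : ∀ (i : Nat) (out : List Int),
    List.foldl stepE out (PySem.List.enumerate runs (i : Int)) = out ++ expSpec i runs := by
  induction runs with
  | nil => intro i out; simp [expSpec]
  | cons p rest ih =>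
    intro i out
    obtain ⟨k, n⟩ := p
    rw [PySem.List.enumerate_cons, List.foldl_cons]
    have hcast : (i : Int) + 1 = ((i + 1 : Nat) : Int) := by push_cast; ring
    rw [hcast, ih (i + 1) (stepE out ((i : Int), (k, n)))]
    simp [stepE, expSpec]

theorem lemCombine (l : List String) : ∀ (k : String) (n i : Nat),
    expSpec i (rleSpec k n l) = List.replicate n (i : Int) ++ refRun k l (i : Int) := by
  induction l with
  | nil => intro k n i; simp [rleSpec, expSpec, refRun]
  | cons x xs ih =>
    intro k n i
    by_cases h : k = x
    · subst h
      have hrle : rleSpec k n (k :: xs) = rleSpec k (n + 1) xs := by simp [rleSpec]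
      have href : refRun k (k :: xs) (i : Int) = (i : Int) :: refRun k xs (i : Int) := by
        simp [refRun]
      rw [hrle, ih k (n + 1) i, href, List.replicate_succ', List.append_assoc]
      simp
    · have hb : (k == x) = false := by simp [h]
      have hb' : (x == k) = false := by simp [Ne.symm h]
      have hrle : rleSpec k n (x :: xs) = (k, n) :: rleSpec x 1 xs := by simp [rleSpec, hb]
      have href : refRun k (x :: xs) (i : Int) = ((i : Int) + 1) :: refRun x xs ((i : Int) + 1) := by
        simp [refRun, hb']
      rw [hrle, href]
      simp only [expSpec]
      rw [ih x 1 (i + 1)]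
      push_cast
      simp

theorem A_char (h : String) (t : List String) :
    rank_of_stages (h :: t) = 0 :: refRun h t 0 := by
  unfold rank_of_stages
  rw [PySem.List.enumerate_cons, List.foldl_cons]
  have hstep : stepA (h :: t) [0] (0, h) = [0] := by simp [stepA]
  rw [hstep]
  have := lemA t (h :: t) 0 [0] h 0 (by simp) (by simp) (by simp)
  simpa using this

theorem B_char (h : String) (t : List String) :
    rank_of_stages_alt (h :: t) = 0 :: refRun h t 0 := by
  unfold rank_of_stages_alt
  simp only
  have hrle : (h :: t).foldl stepR [] = rleSpec h 1 t := by
    rw [List.foldl_cons]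
    have : stepR [] h = [] ++ [(h, 1)] := by simp [stepR]
    rw [this, lemR t [] h 1]; simp
  rw [hrle]
  have := lemE (rleSpec h 1 t) 0 []
  simp only [Nat.cast_zero] at this
  rw [this]
  have := lemCombine t h 1 0
  simpa using this

-- ===== VERDICT (by name: the statement is the Claim_ definition above) =====
theorem rank_of_stages_spec : Claim_unchanged_rank_of_stages := by
  intro stages _ hD
  unfold D_rank_of_stages at hD
  match stages, hD with
  | h :: t, _ => rw [A_char, B_char]

theorem rank_of_stages_changed : Claim_changed_rank_of_stages := by
  unfold Claim_changed_rank_of_stages; decide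

theorem rank_of_stages_tight : Claim_exact_rank_of_stages := by
  intro stages _ hD
  unfold D_rank_of_stages at hD
  subst hD; decide
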